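-- pv_equiv track=rewrite | github.com/lmiksch/cocopaths | cocopaths/utils.py | split_extend_structure
-- ===== SOURCE A (Python) =====
-- def split_extend_structure(domain_seq, domain_lengths, extend_structure):
--     """
--     Splits the extend_structure string into chunks based on the lengths provided for each domain.
--
--     Parameters:
--         domain_seq (str or list): A domain level sequence, either as a space-separated string (e.g., "a b c d e")
--                                   or as a list of domain names (e.g., ["a", "b", "c", "d", "e"]).
--         domain_lengths (dict): A dictionary mapping each domain (e.g., 'a', 'b', etc.) to its length (int).
--         extend_structure (str): A string representing the extended structure (e.g., "(((....)))....").
--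
--     Returns:
--         list: A list of substrings of extend_structure corresponding to each domain.
--     """
--     # If domain_seq is a string, split it into a list
--     if isinstance(domain_seq, str):
--         domains = domain_seq.split()
--     else:
--         domains = domain_seq
--
--     chunks = []
--     start = 0
--
--     for domain in domains:
--         # Get the length for the current domain
--         length = domain_lengths.get(domain)
--         if length is None:
--             raise ValueError(f"Length for domain '{domain}' is not provided in the dictionary.")
--
--         # Slice the extend_structure for the current domain
--         end = start + length
--         chunk = extend_structure[start:end]
--         chunks.append(chunk)
--         start = end
--
--     return chunks
-- ===== SOURCE B (Python) =====
-- def split_extend_structure(domain_seq, domain_lengths, extend_structure):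
--     """Two-phase rewrite: build a lengths list first, then a cumulative
--     boundary table, and slice extend_structure by zipping consecutive
--     boundaries."""
--     domains = domain_seq.split() if isinstance(domain_seq, str) else domain_seq
--     lengths = []
--     for domain in domains:
--         length = domain_lengths.get(domain)
--         if length is None:
--             raise ValueError(f"Length for domain '{domain}' is not provided in the dictionary.")
--         lengths.append(length)
--     bounds = [0]
--     for length in lengths:
--         bounds.append(bounds[-1] + length)
--     return [extend_structure[a:b] for a, b in zip(bounds, bounds[1:])]
-- ===== Notes on version B (the rewrite author's own statement) =====
-- stated objective: alternative
-- what changed: Replaces A's single running-offset loop (slice-and-append per domain) by a two-phase decomposition: first collect the lengths list, then build a cumulative boundary table, and produce the chunks by slicing between consecutive zipped boundaries.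
import Mathlib
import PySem

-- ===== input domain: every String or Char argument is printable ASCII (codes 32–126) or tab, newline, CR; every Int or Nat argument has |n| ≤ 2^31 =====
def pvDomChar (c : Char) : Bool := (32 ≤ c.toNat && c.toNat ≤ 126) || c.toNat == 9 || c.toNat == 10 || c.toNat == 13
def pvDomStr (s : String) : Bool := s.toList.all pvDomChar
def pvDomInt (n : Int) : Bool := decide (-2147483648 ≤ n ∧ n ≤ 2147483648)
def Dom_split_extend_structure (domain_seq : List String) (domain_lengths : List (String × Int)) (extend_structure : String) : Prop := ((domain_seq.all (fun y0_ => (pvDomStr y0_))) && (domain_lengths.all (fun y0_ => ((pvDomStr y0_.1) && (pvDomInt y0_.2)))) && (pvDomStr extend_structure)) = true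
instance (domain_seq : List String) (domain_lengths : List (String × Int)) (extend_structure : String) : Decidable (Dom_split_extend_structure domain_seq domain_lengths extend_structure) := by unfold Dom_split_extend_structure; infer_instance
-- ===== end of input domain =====

-- ===== PORT A =====
-- B differs from A by decomposition only: A makes one running-offset pass, B builds a lengths
-- list and a cumulative boundary table first, then slices between zipped consecutive boundaries.
-- loop of A: state (chunks, start); stops where Python raises (missing domain, outside Pre_)
def splitLoopA (domains : List String) (domain_lengths : List (String × Int)) (extend_structure : String) (chunks : List String) (start : Int) : List String :=
  match domains with
  | [] => chunks
  | domain :: rest =>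
      match (PySem.Dict.mk domain_lengths).get? domain with
      | none => chunks  -- Python raises ValueError here; excluded by Pre_
      | some length =>
          splitLoopA rest domain_lengths extend_structure
            (chunks ++ [PySem.Str.slice extend_structure (some start) (some (start + length))])
            (start + length)

def split_extend_structure (domain_seq : List String) (domain_lengths : List (String × Int)) (extend_structure : String) : List String :=
  splitLoopA domain_seq domain_lengths extend_structure [] 0

-- ===== PORT B =====
-- first pass of B: collect the lengths; stops where Python raises (missing domain, outside Pre_)
def lengthsLoopB (domains : List String) (domain_lengths : List (String × Int)) : List Int :=
  match domains with
  | [] => []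
  | domain :: rest =>
      match (PySem.Dict.mk domain_lengths).get? domain with
      | none => []  -- Python raises ValueError here; excluded by Pre_
      | some length => length :: lengthsLoopB rest domain_lengths

def split_extend_structure_alt (domain_seq : List String) (domain_lengths : List (String × Int)) (extend_structure : String) : List String :=
  let lengths := lengthsLoopB domain_seq domain_lengths
  let bounds := lengths.foldl (fun bs length => bs ++ [bs.getLast! + length]) [0]
  (bounds.zip bounds.tail).map (fun ab => PySem.Str.slice extend_structure (some ab.1) (some ab.2))

-- ===== PRECONDITION & SPEC =====
-- Pre_ excludes exactly the inputs where A raises ValueError: a domain missing from the dictionary.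
def Pre_split_extend_structure (domain_seq : List String) (domain_lengths : List (String × Int)) (extend_structure : String) : Prop :=
  ∀ d ∈ domain_seq, ((PySem.Dict.mk domain_lengths).get? d).isSome = true
instance (domain_seq : List String) (domain_lengths : List (String × Int)) (extend_structure : String) : Decidable (Pre_split_extend_structure domain_seq domain_lengths extend_structure) := by unfold Pre_split_extend_structure; infer_instance

def pvWitness_split_extend_structure : List String × (List (String × Int)) × String :=
  (["a", "b"], [("a", 3), ("b", 2)], "(((..")

def Spec_split_extend_structure (domain_seq : List String) (domain_lengths : List (String × Int)) (extend_structure : String) (out : List String) : Prop := out = split_extend_structure_alt domain_seq domain_lengths extend_structure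
instance (domain_seq : List String) (domain_lengths : List (String × Int)) (extend_structure : String) (out : List String) : Decidable (Spec_split_extend_structure domain_seq domain_lengths extend_structure out) := by unfold Spec_split_extend_structure; infer_instance

-- ===== CLAIM (what is proved, stated in full; the proofs are below) =====
def Claim_equal_split_extend_structure : Prop := ∀ (domain_seq : List String) (domain_lengths : List (String × Int)) (extend_structure : String), Dom_split_extend_structure domain_seq domain_lengths extend_structure → Pre_split_extend_structure domain_seq domain_lengths extend_structure → Spec_split_extend_structure domain_seq domain_lengths extend_structure (split_extend_structure domain_seq domain_lengths extend_structure)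

-- ===== LEMMAS AND PROOFS =====

-- B's boundary-building foldl is scanl of (+)
theorem foldl_bounds_eq_scanl (lengths bs : List Int) (s : Int) :
    lengths.foldl (fun bs length => bs ++ [bs.getLast! + length]) (bs ++ [s])
      = bs ++ List.scanl (· + ·) s lengths := by
  induction lengths generalizing bs s with
  | nil => simp [List.scanl]
  | cons l rest ih =>
      simp only [List.foldl_cons, List.scanl_cons]
      rw [show (bs ++ [s]).getLast! = s by simp, List.append_assoc]
      simpa using ih (bs ++ [s]) (s + l)

-- the zipped consecutive-pairs view of a scanl list, peeling one boundary
theorem zip_cons_tail_scanl (f : Int → Int → Int) (b x : Int) (L : List Int) :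
    ((x :: List.scanl f b L).zip (x :: List.scanl f b L).tail)
      = (x, b) :: ((List.scanl f b L).zip (List.scanl f b L).tail) := by
  cases L <;> simp [List.scanl]

-- A's running loop equals mapping slices over consecutive scanl boundaries
theorem splitLoopA_eq (domains : List String) (dl : List (String × Int)) (es : String)
    (chunks : List String) (start : Int)
    (h : ∀ d ∈ domains, ((PySem.Dict.mk dl).get? d).isSome = true) :
    splitLoopA domains dl es chunks start
      = chunks ++ ((List.scanl (· + ·) start (lengthsLoopB domains dl)).zip
          (List.scanl (· + ·) start (lengthsLoopB domains dl)).tail).map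
          (fun ab => PySem.Str.slice es (some ab.1) (some ab.2)) := by
  induction domains generalizing chunks start with
  | nil => simp [splitLoopA, lengthsLoopB, List.scanl]
  | cons d rest ih =>
      have hd : ((PySem.Dict.mk dl).get? d).isSome = true := h d (by simp)
      obtain ⟨l, hl⟩ := Option.isSome_iff_exists.mp hd
      simp only [splitLoopA, lengthsLoopB, hl]
      rw [ih _ (start + l) (fun x hx => h x (by simp [hx]))]
      rw [List.scanl_cons, zip_cons_tail_scanl]
      simp [List.append_assoc]

-- ===== VERDICT (by name: the statement is the Claim_ definition above) =====
theorem split_extend_structure_spec : Claim_equal_split_extend_structure := by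
  intro domain_seq domain_lengths extend_structure _ hpre
  unfold Spec_split_extend_structure split_extend_structure split_extend_structure_alt
  have hb := foldl_bounds_eq_scanl (lengthsLoopB domain_seq domain_lengths) [] 0
  simp only [List.nil_append] at hb
  dsimp only
  rw [splitLoopA_eq domain_seq domain_lengths extend_structure [] 0 hpre, hb, List.nil_append]
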